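-- pv_equiv track=rewrite | github.com/Kamalesh-Seervi/gap-terraform-mcp-server | src/gcp_terraform_mcp_server/handlers/terraform_workflow_handlers.py | format_plan_output
-- ===== SOURCE A (Python) =====
-- def format_plan_output(output: str) -> str:
--     """Format Terraform plan output for readability."""
--     lines = output.splitlines()
--     formatted_lines = []
--
--     # Find the plan summary sections
--     plan_section = False
--     for line in lines:
--         if "Plan:" in line:
--             plan_section = True
--             formatted_lines.append("\n## Plan Summary\n")
--
--         if plan_section:
--             formatted_lines.append(line)
--
--     if formatted_lines:
--         return "# Terraform Plan\n\n" + "\n".join(formatted_lines)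
--     else:
--         return "# Terraform Plan\n\n" + output
-- ===== SOURCE B (Python) =====
-- def format_plan_output(output: str) -> str:
--     """Format Terraform plan output for readability."""
--     lines = output.splitlines()
--     idx = next((i for i, line in enumerate(lines) if "Plan:" in line), None)
--     if idx is None:
--         return "# Terraform Plan\n\n" + output
--     parts = []
--     for line in lines[idx:]:
--         if "Plan:" in line:
--             parts.append("\n## Plan Summary\n")
--         parts.append(line)
--     return "# Terraform Plan\n\n" + "\n".join(parts)
-- ===== Notes on version B (the rewrite author's own statement) =====
-- stated objective: simpler
-- what changed: Replaces the stateful flag-flipping pass over all lines by first locating the index of the first 'Plan:' line (early exit to the no-match return), then transforming only the tail lines[idx:].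
import Mathlib
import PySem

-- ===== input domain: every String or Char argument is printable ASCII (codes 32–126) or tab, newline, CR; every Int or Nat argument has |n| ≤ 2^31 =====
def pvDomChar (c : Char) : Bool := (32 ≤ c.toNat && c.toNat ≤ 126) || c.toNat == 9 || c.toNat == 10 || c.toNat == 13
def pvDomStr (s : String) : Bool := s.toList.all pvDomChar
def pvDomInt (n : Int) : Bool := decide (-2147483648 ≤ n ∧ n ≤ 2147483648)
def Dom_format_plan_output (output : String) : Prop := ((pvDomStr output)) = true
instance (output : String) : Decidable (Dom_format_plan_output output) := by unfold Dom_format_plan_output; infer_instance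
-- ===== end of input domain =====

-- B replaces A's stateful flag-flipping single pass by locating the first 'Plan:' line and
-- transforming only the tail from there (objective: simpler decomposition, same cost).

-- ===== PORT A =====
-- loop body of A: maybe flip the flag and emit the header, then emit the line if the flag is set
def fpoStepA (st : Bool × List String) (line : String) : Bool × List String :=
  let st1 := if PySem.Str.isIn "Plan:" line then (true, st.2 ++ ["\n## Plan Summary\n"]) else st
  if st1.1 then (st1.1, st1.2 ++ [line]) else st1

def format_plan_output (output : String) : String :=
  let lines := PySem.Str.splitlines output
  let st := lines.foldl fpoStepA (false, [])
  if st.2 ≠ [] then "# Terraform Plan\n\n" ++ PySem.Str.join "\n" st.2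
  else "# Terraform Plan\n\n" ++ output

-- ===== PORT B =====
-- the parts B emits for one tail line
def fpoEmit (line : String) : List String :=
  if PySem.Str.isIn "Plan:" line then ["\n## Plan Summary\n", line] else [line]

def format_plan_output_alt (output : String) : String :=
  let lines := PySem.Str.splitlines output
  match lines.findIdx? (fun l => PySem.Str.isIn "Plan:" l) with
  | none => "# Terraform Plan\n\n" ++ output
  | some i =>
      "# Terraform Plan\n\n" ++
        PySem.Str.join "\n" ((lines.drop i).foldl (fun acc l => acc ++ fpoEmit l) [])

-- ===== PRECONDITION & SPEC =====
def Spec_format_plan_output (output : String) (out : String) : Prop := out = format_plan_output_alt output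
instance (output : String) (out : String) : Decidable (Spec_format_plan_output output out) := by unfold Spec_format_plan_output; infer_instance

-- ===== CLAIM (what is proved, stated in full; the proofs are below) =====
def Claim_equal_format_plan_output : Prop := ∀ (output : String), Dom_format_plan_output output → Spec_format_plan_output output (format_plan_output output)

-- ===== LEMMAS AND PROOFS =====

-- once A's flag is set, every further line contributes exactly fpoEmit of it
theorem fpoStepA_true_loop (t : List String) : ∀ acc : List String,
    t.foldl fpoStepA (true, acc) = (true, acc ++ t.flatMap fpoEmit) := by
  induction t with
  | nil => intro acc; simp
  | cons l t ih =>
      intro acc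
      have hstep : fpoStepA (true, acc) l = (true, acc ++ fpoEmit l) := by
        unfold fpoStepA fpoEmit
        by_cases h : PySem.Chars.isIn ['P', 'l', 'a', 'n', ':'] l.toList = true <;> simp [h]
      simp only [List.foldl_cons, hstep, ih, List.flatMap_cons, List.append_assoc]

-- A's whole loop, characterised through B's split point
theorem fpoLoop (lines : List String) :
    lines.foldl fpoStepA (false, []) =
      match lines.findIdx? (fun l => PySem.Str.isIn "Plan:" l) with
      | none => ((false : Bool), ([] : List String))
      | some i => (true, (lines.drop i).flatMap fpoEmit) := by
  induction lines with
  | nil => simp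
  | cons l t ih =>
      by_cases h : PySem.Chars.isIn ['P', 'l', 'a', 'n', ':'] l.toList = true
      · have hstep : fpoStepA (false, []) l = (true, ["\n## Plan Summary\n", l]) := by
          unfold fpoStepA; simp [h]
        have hemit : fpoEmit l = ["\n## Plan Summary\n", l] := by unfold fpoEmit; simp [h]
        simp only [List.foldl_cons, hstep, fpoStepA_true_loop, List.findIdx?_cons]
        simp [h, hemit]
      · have hstep : fpoStepA (false, []) l = (false, []) := by
          unfold fpoStepA; simp [h]
        simp only [List.foldl_cons, hstep, ih, List.findIdx?_cons]
        cases hfi : t.findIdx? (fun l => PySem.Str.isIn "Plan:" l) with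
        | none => simp [h]
        | some i => simp [h]

theorem fpoEmit_ne_nil (l : String) : fpoEmit l ≠ [] := by
  unfold fpoEmit
  by_cases h : PySem.Chars.isIn ['P', 'l', 'a', 'n', ':'] l.toList = true <;> simp [h]

-- ===== VERDICT (by name: the statement is the Claim_ definition above) =====
theorem format_plan_output_spec : Claim_equal_format_plan_output := by
  intro output _
  unfold Spec_format_plan_output format_plan_output format_plan_output_alt
  simp only [fpoLoop]
  cases hfi : (PySem.Str.splitlines output).findIdx? (fun l => PySem.Str.isIn "Plan:" l) with
  | none => simp
  | some i =>
      have hi : i < (PySem.Str.splitlines output).length := (List.findIdx?_eq_some_iff_getElem.mp hfi).1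
      have hdrop : (PySem.Str.splitlines output).drop i =
          (PySem.Str.splitlines output)[i] :: (PySem.Str.splitlines output).drop (i + 1) :=
        List.drop_eq_getElem_cons hi
      have hne : ((PySem.Str.splitlines output).drop i).flatMap fpoEmit ≠ [] := by
        rw [hdrop, List.flatMap_cons]
        intro hc
        exact fpoEmit_ne_nil _ (List.append_eq_nil_iff.mp hc).1
      have hfold : ((PySem.Str.splitlines output).drop i).foldl
          (fun acc l => acc ++ fpoEmit l) [] =
          ((PySem.Str.splitlines output).drop i).flatMap fpoEmit := by
        rw [PySem.List.foldl_append_eq_flatMap]; rfl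
      simp [hne, hfold]
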